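-- pv_equiv track=rewrite | github.com/AJ07009/WTC_projects | Python_projects/submission_004-problem-master/super_algos.py | rec_min
-- ===== SOURCE A (Python) =====
-- def rec_min(unit_set, elements):
--     '''
--     This will find the lowest number through recursion
--     '''
--     if len(elements) == 0:
--         return  unit_set
--     e = elements[0]
--     if e < unit_set:
--         unit_set = e
--     min_unit = rec_min(unit_set, elements[1:])
--     return min_unit
-- ===== SOURCE B (Python) =====
-- def rec_min(unit_set, elements):
--     """Iterative running-minimum accumulator instead of recursion on the tail."""
--     for e in elements:
--         if e < unit_set:
--             unit_set = e
--     return unit_set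
-- ===== Notes on version B (the rewrite author's own statement) =====
-- stated objective: faster
-- what changed: Replaced the tail recursion (which copies elements[1:] at every step) by a single iterative for-loop keeping a running-minimum accumulator.
import Mathlib
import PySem

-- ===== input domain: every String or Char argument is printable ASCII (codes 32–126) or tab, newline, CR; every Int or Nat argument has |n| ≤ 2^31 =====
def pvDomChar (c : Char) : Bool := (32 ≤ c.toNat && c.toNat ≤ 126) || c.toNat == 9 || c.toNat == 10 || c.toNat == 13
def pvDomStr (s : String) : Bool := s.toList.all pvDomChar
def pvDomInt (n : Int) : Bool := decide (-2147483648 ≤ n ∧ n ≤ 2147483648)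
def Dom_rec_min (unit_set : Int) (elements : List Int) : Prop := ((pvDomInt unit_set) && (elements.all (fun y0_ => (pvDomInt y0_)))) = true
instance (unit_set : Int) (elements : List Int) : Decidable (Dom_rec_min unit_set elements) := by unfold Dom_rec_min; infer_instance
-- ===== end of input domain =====

-- B replaces A's tail recursion over elements[1:] with an iterative accumulator loop (simpler, same value).


-- ===== PORT A =====
-- A: recursion on the list; takes head, updates unit_set on strict <, recurses on the tail.
def rec_min (unit_set : Int) (elements : List Int) : Int :=
  match elements with
  | [] => unit_set
  | e :: rest =>
    let unit_set' := if e < unit_set then e else unit_set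
    let min_unit := rec_min unit_set' rest
    min_unit

-- ===== PORT B =====
-- B: iterative loop (fold) keeping a running-minimum accumulator.
def rec_min_alt (unit_set : Int) (elements : List Int) : Int :=
  elements.foldl (fun acc e => if e < acc then e else acc) unit_set

-- ===== PRECONDITION & SPEC =====
def Spec_rec_min (unit_set : Int) (elements : List Int) (out : Int) : Prop := out = rec_min_alt unit_set elements
instance (unit_set : Int) (elements : List Int) (out : Int) : Decidable (Spec_rec_min unit_set elements out) := by unfold Spec_rec_min; infer_instance

-- ===== CLAIM (what is proved, stated in full; the proofs are below) =====
def Claim_equal_rec_min : Prop := ∀ (unit_set : Int) (elements : List Int), Dom_rec_min unit_set elements → Spec_rec_min unit_set elements (rec_min unit_set elements)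

-- ===== LEMMAS AND PROOFS =====

-- ===== VERDICT (by name: the statement is the Claim_ definition above) =====
theorem rec_min_eq_foldl (elements : List Int) : ∀ unit_set : Int,
    rec_min unit_set elements = rec_min_alt unit_set elements := by
  induction elements with
  | nil => intro u; rfl
  | cons e rest ih =>
    intro u
    simp only [rec_min, rec_min_alt, List.foldl]
    exact ih _

theorem rec_min_spec : Claim_equal_rec_min := by
  intro u es _
  unfold Spec_rec_min
  exact rec_min_eq_foldl es u
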